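-- pv_equiv track=rewrite | github.com/pc099/acron-eta | src/optimization/optimizer.py | _assemble_prompt
-- ===== SOURCE A (Python) =====
-- from typing import Any, Dict, List, Literal, Optional
--
-- def _assemble_prompt(parts: Dict[str, str]) -> str:
--     """Assemble prompt parts into a single string.
--
--     Order: system -> example -> history -> document -> query.
--
--     Args:
--         parts: Prompt parts by category.
--
--     Returns:
--         Assembled prompt string.
--     """
--     order = ["system", "example", "examples", "history", "document", "query"]
--     sections: List[str] = []
--     for key in order:
--         if key in parts and parts[key].strip():
--             sections.append(parts[key])
--     # Include any remaining keys not in the standard order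
--     for key in parts:
--         if key not in order and parts[key].strip():
--             sections.append(parts[key])
--     return "\n\n".join(sections)
-- ===== SOURCE B (Python) =====
-- def _assemble_prompt(parts):
--     """Assemble prompt parts into a single string (one sorted pass)."""
--     order = ["system", "example", "examples", "history", "document", "query"]
--
--     def priority(key):
--         try:
--             return order.index(key)
--         except ValueError:
--             return len(order)
--
--     ordered_keys = sorted(parts, key=priority)
--     sections = [parts[k] for k in ordered_keys if parts[k].strip()]
--     return "\n\n".join(sections)
-- ===== Notes on version B (the rewrite author's own statement) =====
-- stated objective: simpler
-- what changed: Replaces A's two sequential append-loops (one over the fixed order list, one over the remaining dict keys) with a single pass: stable-sort the keys by their position in the order list (absent keys get len(order)), then filter-and-join in one comprehension.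
import Mathlib
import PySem

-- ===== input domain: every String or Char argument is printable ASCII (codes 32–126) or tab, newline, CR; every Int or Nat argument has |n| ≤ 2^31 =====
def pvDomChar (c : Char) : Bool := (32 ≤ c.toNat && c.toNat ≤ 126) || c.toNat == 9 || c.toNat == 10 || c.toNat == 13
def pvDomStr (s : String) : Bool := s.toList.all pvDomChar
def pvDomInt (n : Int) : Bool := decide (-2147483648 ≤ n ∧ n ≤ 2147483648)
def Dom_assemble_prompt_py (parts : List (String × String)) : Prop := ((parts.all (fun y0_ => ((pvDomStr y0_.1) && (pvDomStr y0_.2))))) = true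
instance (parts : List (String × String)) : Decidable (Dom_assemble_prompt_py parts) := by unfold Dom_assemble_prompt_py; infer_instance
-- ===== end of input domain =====

-- B replaces A's two sequential append-loops with one stable-sorted pass over the keys
-- (priority = position in the fixed order list, absent keys last) followed by a single
-- filter-and-join comprehension; objective: simpler (same cost, one pass over the keys).

-- The fixed category order (the `order` local of both Pythons).
def pvOrder : List String := ["system", "example", "examples", "history", "document", "query"]

-- Python dict lookup parts[k] / parts.get(k): first match in the association list
-- (exact for a Python dict, whose keys are unique — Pre_ demands nodup keys).
def pvGet? (parts : List (String × String)) (k : String) : Option String :=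
  (parts.find? (fun p => p.1 == k)).map (·.2)

-- ===== PORT A =====
def assemble_prompt_py (parts : List (String × String)) : String :=
  -- first loop: for key in order: if key in parts and parts[key].strip(): append
  let s1 := pvOrder.foldl (fun acc key =>
      match pvGet? parts key with
      | some v => if PySem.Str.strip v ≠ "" then acc ++ [v] else acc
      | none => acc) ([] : List String)
  -- second loop: for key in parts: if key not in order and parts[key].strip(): append
  let s2 := (parts.map Prod.fst).foldl (fun acc key =>
      if pvOrder.contains key then acc
      else match pvGet? parts key with
           | some v => if PySem.Str.strip v ≠ "" then acc ++ [v] else acc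
           | none => acc) s1
  PySem.Str.join "\n\n" s2

-- ===== PORT B =====
-- priority(key): order.index(key), or len(order) when absent (the ValueError branch).
def pv_priority (key : String) : Nat := (PySem.List.index? pvOrder key).getD pvOrder.length

def assemble_prompt_py_alt (parts : List (String × String)) : String :=
  let orderedKeys := PySem.List.sorted (parts.map Prod.fst) pv_priority
  -- [parts[k] for k in ordered_keys if parts[k].strip()]  (k is always present: getD "" is exact)
  let sections := (orderedKeys.filter
      (fun k => PySem.Str.strip ((pvGet? parts k).getD "") != "")).map
      (fun k => (pvGet? parts k).getD "")
  PySem.Str.join "\n\n" sections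

-- ===== PRECONDITION & SPEC =====
-- Pre_ excludes association lists with duplicate keys: they do not encode any Python dict
-- (A's parameter is a dict, whose keys are unique), so the ports' behaviour there is an
-- accident of the assoc-list encoding, not of either program.
def Pre_assemble_prompt_py (parts : List (String × String)) : Prop :=
  (parts.map Prod.fst).Nodup
instance (parts : List (String × String)) : Decidable (Pre_assemble_prompt_py parts) := by
  unfold Pre_assemble_prompt_py; infer_instance

def pvWitness_assemble_prompt_py : (List (String × String)) :=
  [("query", " q "), ("system", "sys"), ("notes", ""), ("extra", "e")]

def Spec_assemble_prompt_py (parts : List (String × String)) (out : String) : Prop :=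
  out = assemble_prompt_py_alt parts
instance (parts : List (String × String)) (out : String) : Decidable (Spec_assemble_prompt_py parts out) := by
  unfold Spec_assemble_prompt_py; infer_instance

-- ===== CLAIM =====
def Claim_equal_assemble_prompt_py : Prop :=
  ∀ (parts : List (String × String)), Dom_assemble_prompt_py parts →
    Pre_assemble_prompt_py parts →
      Spec_assemble_prompt_py parts (assemble_prompt_py parts)

-- ===== LEMMAS AND PROOFS =====

-- insertBy pushes past a prefix none of whose elements x goes before.
theorem pv_insertBy_append {α : Type} (before : α → α → Bool) (x : α) (A B : List α)
    (h : ∀ a ∈ A, before x a = false) :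
    PySem.List.insertBy before x (A ++ B) = A ++ PySem.List.insertBy before x B := by
  induction A with
  | nil => simp
  | cons a t ih =>
    have ha : before x a = false := h a (by simp)
    simp [PySem.List.insertBy, ha]
    exact ih (fun b hb => h b (by simp [hb]))

-- Stable insertion of x into a priority-classified concatenation: x lands at the end
-- of its own class.
theorem pv_insertBy_flatMap {α : Type} (key : α → Nat) (x : α) (ps : List Nat)
    (f : Nat → List α) (hps : ps.Pairwise (· < ·))
    (hf : ∀ p ∈ ps, ∀ a ∈ f p, key a = p) (hx : key x ∈ ps) :
    PySem.List.insertBy (fun a b => decide (key a < key b)) x (ps.flatMap f)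
      = ps.flatMap (fun p => if p = key x then f p ++ [x] else f p) := by
  induction ps with
  | nil => simp at hx
  | cons p t ih =>
    rw [List.flatMap_cons, List.flatMap_cons]
    by_cases hpx : p = key x
    · subst hpx
      rw [pv_insertBy_append _ x (f (key x)) _ (fun a ha => by
        have h1 := hf (key x) (by simp) a ha; simp [h1])]
      have hfront : PySem.List.insertBy (fun a b => decide (key a < key b)) x (t.flatMap f)
          = x :: t.flatMap f := by
        cases hflat : t.flatMap f with
        | nil => simp [PySem.List.insertBy]
        | cons b bs =>
          have hb : b ∈ t.flatMap f := by rw [hflat]; simp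
          obtain ⟨q, hq, hbq⟩ := List.mem_flatMap.mp hb
          have hkb : key b = q := hf q (by simp [hq]) b hbq
          have hlt : key x < q := (List.pairwise_cons.mp hps).1 q hq
          simp [PySem.List.insertBy, hkb, hlt]
      rw [hfront]
      have ht : t.flatMap (fun q => if q = key x then f q ++ [x] else f q) = t.flatMap f := by
        apply List.flatMap_congr
        intro q hq
        have hlt : key x < q := (List.pairwise_cons.mp hps).1 q hq
        simp [Nat.ne_of_gt hlt]
      simp [ht]
    · have hxt : key x ∈ t := by
        cases List.mem_cons.mp hx with
        | inl h => exact absurd h.symm hpx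
        | inr h => exact h
      have hplt : p < key x := (List.pairwise_cons.mp hps).1 _ hxt
      rw [pv_insertBy_append _ x (f p) _ (fun a ha => by
        have := hf p (by simp) a ha
        simp [this, Nat.not_lt.mpr (Nat.le_of_lt hplt)])]
      rw [ih (List.pairwise_cons.mp hps).2 (fun q hq => hf q (by simp [hq])) hxt]
      simp [hpx]

-- Stable sort by a Nat priority < N = concatenation of the priority classes,
-- each in original order.
theorem pv_sorted_classes {α : Type} (key : α → Nat) (N : Nat) (xs : List α)
    (h : ∀ x ∈ xs, key x < N) :
    PySem.List.sorted xs key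
      = (List.range N).flatMap (fun p => xs.filter (fun a => decide (key a = p))) := by
  induction xs using List.reverseRecOn with
  | nil => simp [PySem.List.sorted_eq_foldl_insertBy]
  | append_singleton xs x ih =>
    rw [PySem.List.sorted_eq_foldl_insertBy, List.foldl_append, List.foldl_cons, List.foldl_nil,
      ← PySem.List.sorted_eq_foldl_insertBy, ih (fun a ha => h a (by simp [ha]))]
    rw [pv_insertBy_flatMap key x (List.range N)
      (fun p => xs.filter (fun a => decide (key a = p)))
      (List.pairwise_lt_range) (fun p _ a ha => by simpa using (List.of_mem_filter ha))
      (List.mem_range.mpr (h x (by simp)))]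
    apply List.flatMap_congr
    intro p hp
    by_cases hpx : p = key x
    · simp [hpx, List.filter_append]
    · have hxp : ¬ key x = p := fun h => hpx h.symm
      simp [hpx, hxp, List.filter_append]

-- filter (== c) on a nodup list.
theorem pv_filter_beq_of_nodup (keys : List String) (h : keys.Nodup) (c : String) :
    keys.filter (fun k => k == c) = if c ∈ keys then [c] else [] := by
  induction keys with
  | nil => simp
  | cons a t ih =>
    rcases List.nodup_cons.mp h with ⟨hat, hnd⟩
    by_cases hac : a = c
    · subst hac
      have : t.filter (fun k => k == a) = [] := by
        rw [List.filter_eq_nil_iff]; intro b hb; simp; rintro rfl; exact hat hb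
      simp [this]
    · simp only [List.filter_cons, List.mem_cons]
      rw [ih hnd]
      simp [hac, Ne.symm hac]

-- pv_priority, written out as a case chain over the six order keys.
theorem pv_priority_char (k : String) :
    pv_priority k =
      if k = "system" then 0 else if k = "example" then 1 else if k = "examples" then 2
      else if k = "history" then 3 else if k = "document" then 4 else if k = "query" then 5
      else 6 := by
  by_cases h0 : k = "system"; · subst h0; decide
  by_cases h1 : k = "example"; · subst h1; decide
  by_cases h2 : k = "examples"; · subst h2; decide
  by_cases h3 : k = "history"; · subst h3; decide
  by_cases h4 : k = "document"; · subst h4; decide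
  by_cases h5 : k = "query"; · subst h5; decide
  have hnm : k ∉ pvOrder := by
    simp [pvOrder]
    exact ⟨h0, h1, h2, h3, h4, h5⟩
  have hni : PySem.List.index? pvOrder k = none := (PySem.List.index?_eq_none_iff _ _).mpr hnm
  simp only [pv_priority]
  rw [hni]
  simp [pvOrder, h0, h1, h2, h3, h4, h5]

-- pvGet? is some exactly on the present keys.
theorem pv_get?_isSome_iff (parts : List (String × String)) (k : String) :
    (pvGet? parts k).isSome ↔ k ∈ parts.map Prod.fst := by
  simp [pvGet?, List.find?_isSome]

-- A's append step = a one-class section, in terms of B's getD-reads.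
theorem pv_step_eq (parts : List (String × String)) (c : String) (acc : List String) :
    (match pvGet? parts c with
      | some v => if PySem.Str.strip v ≠ "" then acc ++ [v] else acc
      | none => acc)
      = acc ++ (((if c ∈ parts.map Prod.fst then [c] else []).filter
          (fun k => PySem.Str.strip ((pvGet? parts k).getD "") != "")).map
          (fun k => (pvGet? parts k).getD "")) := by
  cases hg : pvGet? parts c with
  | none =>
    have hc : c ∉ parts.map Prod.fst := by
      rw [← pv_get?_isSome_iff, hg]; simp
    simp [hc]
  | some v =>
    have hc : c ∈ parts.map Prod.fst := by
      rw [← pv_get?_isSome_iff, hg]; simp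
    by_cases hs : PySem.Str.strip v = "" <;> simp [hc, hg, hs]

-- ===== VERDICT =====
set_option maxHeartbeats 2000000 in
theorem assemble_prompt_py_spec : Claim_equal_assemble_prompt_py := by
  intro parts _hdom hpre
  unfold Spec_assemble_prompt_py assemble_prompt_py assemble_prompt_py_alt
  set keys := parts.map Prod.fst with hkeys
  have hnd : keys.Nodup := hpre
  set condB : String → Bool := fun k => PySem.Str.strip ((pvGet? parts k).getD "") != "" with hcond
  set getB : String → String := fun k => (pvGet? parts k).getD "" with hget
  -- B's sorted key list, class by class
  have hbound : ∀ k ∈ keys, pv_priority k < 7 := by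
    intro k _; rw [pv_priority_char k]
    split_ifs <;> omega
  have hsorted := pv_sorted_classes pv_priority 7 keys hbound
  -- each order class is a singleton-or-empty
  have hclass : ∀ i : Nat, ∀ c : String, (∀ k : String, (pv_priority k = i) ↔ k = c) →
      keys.filter (fun a => decide (pv_priority a = i)) = if c ∈ keys then [c] else [] := by
    intro i c hiff
    rw [show (fun a => decide (pv_priority a = i)) = (fun a => a == c) by
      funext a
      by_cases h : a = c
      · simp [h, (hiff c).mpr rfl]
      · have hni : pv_priority a ≠ i := fun hp => h ((hiff a).mp hp)
        simp [h, hni]]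
    exact pv_filter_beq_of_nodup keys hnd c
  have h0 := hclass 0 "system" (fun k => by rw [pv_priority_char k]; split_ifs <;> simp_all)
  have h1 := hclass 1 "example" (fun k => by rw [pv_priority_char k]; split_ifs <;> simp_all)
  have h2 := hclass 2 "examples" (fun k => by rw [pv_priority_char k]; split_ifs <;> simp_all)
  have h3 := hclass 3 "history" (fun k => by rw [pv_priority_char k]; split_ifs <;> simp_all)
  have h4 := hclass 4 "document" (fun k => by rw [pv_priority_char k]; split_ifs <;> simp_all)
  have h5 := hclass 5 "query" (fun k => by rw [pv_priority_char k]; split_ifs <;> simp_all)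
  -- class 6 = the keys outside pvOrder
  have h6 : keys.filter (fun a => decide (pv_priority a = 6))
      = keys.filter (fun k => !pvOrder.contains k) := by
    apply List.filter_congr
    intro k _
    rw [pv_priority_char k]
    by_cases hm : k ∈ pvOrder
    · simp [pvOrder] at hm
      rcases hm with h | h | h | h | h | h <;> simp [h, pvOrder]
    · simp [pvOrder] at hm
      obtain ⟨g0, g1, g2, g3, g4, g5⟩ := hm
      simp [g0, g1, g2, g3, g4, g5, pvOrder]
  have hrange : List.range 7 = [0, 1, 2, 3, 4, 5, 6] := by decide
  rw [hrange] at hsorted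
  have stepA := fun c acc => pv_step_eq parts c acc
  show PySem.Str.join "\n\n" _ = PySem.Str.join "\n\n" _
  congr 1
  rw [hsorted]
  -- unfold A's first loop (6 literal steps)
  simp only [pvOrder, List.foldl_cons, List.foldl_nil]
  rw [stepA "system", stepA "example", stepA "examples", stepA "history",
    stepA "document", stepA "query"]
  -- A's second loop: congr to the if-append shape, then foldl_append_if
  rw [PySem.List.foldl_congr_mem keys _
    (fun acc key => if (!pvOrder.contains key && condB key) then acc ++ [getB key] else acc) _
    (by
      intro acc k hk
      have hks : (pvGet? parts k).isSome := (pv_get?_isSome_iff parts k).mpr hk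
      cases hg : pvGet? parts k with
      | none => rw [hg] at hks; simp at hks
      | some v =>
        have hgB : getB k = v := by simp [hget, hg]
        have hcB : condB k = (PySem.Str.strip v != "") := by simp [hcond, hg]
        by_cases hmp : k ∈ pvOrder
        · simp [pvOrder] at hmp ⊢
          rcases hmp with h | h | h | h | h | h <;> simp [h]
        · by_cases hs : PySem.Str.strip v = "" <;>
            simp [pvOrder, hcB, hgB, hs] <;>
            simp [pvOrder] at hmp <;> simp [hmp])]
  rw [PySem.List.foldl_append_if (fun key => (!pvOrder.contains key && condB key)) getB keys]
  -- B's side: distribute filter/map over the seven classes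
  simp only [List.flatMap_cons, List.flatMap_nil, List.append_nil,
    List.filter_append, List.map_append]
  rw [h0, h1, h2, h3, h4, h5, h6]
  rw [show keys.filter (fun key => (!pvOrder.contains key && condB key))
      = (keys.filter (fun k => !pvOrder.contains k)).filter condB by
    rw [List.filter_filter]; apply List.filter_congr; intro k _; rw [Bool.and_comm]]
  simp [List.append_assoc]
  rfl
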